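-- pv_equiv track=rewrite | github.com/p0s/the-mind | scripts/fetch_transcripts.py | _best_lang_for_prefix
-- ===== SOURCE A (Python) =====
-- from typing import Any, Dict, Iterable, List, Optional, Tuple
--
-- def _best_lang_for_prefix(keys: List[str], prefix: str) -> Optional[str]:
--     """Pick the "best" language code for a prefix (en/de)."""
--     prefix_l = prefix.lower()
--     keys_l = {k.lower(): k for k in keys}  # preserve original casing
--
--     # Exact match first.
--     if prefix_l in keys_l:
--         return keys_l[prefix_l]
--
--     # Common variants, shortest first (e.g., en-US over en-US-x-...).
--     variants = [k for k in keys if k.lower().startswith(prefix_l + "-")]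
--     if variants:
--         return sorted(variants, key=lambda s: (len(s), s.lower()))[0]
--
--     # Any remaining startswith, e.g. "en_or" unlikely but keep it.
--     any_pref = [k for k in keys if k.lower().startswith(prefix_l)]
--     if any_pref:
--         return sorted(any_pref, key=lambda s: (len(s), s.lower()))[0]
--     return None
-- ===== SOURCE B (Python) =====
-- from typing import List, Optional
--
--
-- def _lt_key(a: str, b: str) -> bool:
--     return (len(a), a.lower()) < (len(b), b.lower())
--
--
-- def _best_lang_for_prefix(keys: List[str], prefix: str) -> Optional[str]:
--     """Single pass: track exact (last wins), best hyphen-variant and best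
--     any-prefix match (first-seen wins ties under (len, lower))."""
--     prefix_l = prefix.lower()
--     dash = prefix_l + "-"
--     exact = None
--     best_variant = None
--     best_any = None
--     for k in keys:
--         kl = k.lower()
--         if kl == prefix_l:
--             exact = k
--         if kl.startswith(dash):
--             if best_variant is None or _lt_key(k, best_variant):
--                 best_variant = k
--         if kl.startswith(prefix_l):
--             if best_any is None or _lt_key(k, best_any):
--                 best_any = k
--     if exact is not None:
--         return exact
--     if best_variant is not None:
--         return best_variant
--     return best_any
-- ===== Notes on version B (the rewrite author's own statement) =====
-- stated objective: faster
-- what changed: Replaces the lowercase dict plus two filter-then-sort passes by a single loop over keys that tracks the exact match (last wins), the best hyphen-variant and the best any-prefix match under a strict (len, lower) comparison (first-seen wins ties).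
import Mathlib
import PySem

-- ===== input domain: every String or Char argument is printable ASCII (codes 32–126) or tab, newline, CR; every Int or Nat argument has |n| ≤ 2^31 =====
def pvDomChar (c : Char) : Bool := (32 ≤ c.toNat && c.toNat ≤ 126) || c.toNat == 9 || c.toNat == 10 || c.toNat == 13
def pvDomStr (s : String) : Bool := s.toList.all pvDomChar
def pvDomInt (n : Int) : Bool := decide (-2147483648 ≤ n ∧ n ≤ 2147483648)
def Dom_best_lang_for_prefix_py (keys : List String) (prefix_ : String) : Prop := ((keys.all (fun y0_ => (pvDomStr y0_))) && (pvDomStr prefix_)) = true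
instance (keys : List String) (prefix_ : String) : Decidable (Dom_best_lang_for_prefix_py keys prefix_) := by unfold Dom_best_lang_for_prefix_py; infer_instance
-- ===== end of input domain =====

-- B replaces dict + two filter-and-sort passes by one loop tracking exact / best variant / best any-prefix match (objective: simpler, one pass).

-- ===== PORT A =====
-- literal transliteration of _best_lang_for_prefix
def best_lang_for_prefix_py (keys : List String) (prefix_ : String) : Option String :=
  let prefix_l := PySem.Str.lower prefix_
  let keys_l := keys.foldl (fun d k => d.insert (PySem.Str.lower k) k)
    (PySem.Dict.empty : PySem.Dict String String)
  match keys_l.get? prefix_l with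
  | some v => some v
  | none =>
    let variants := keys.filter (fun k => PySem.Str.startswith (PySem.Str.lower k) (prefix_l ++ "-"))
    if variants.isEmpty = false then
      (PySem.List.sorted2 variants PySem.Str.len PySem.Str.lower).head?
    else
      let any_pref := keys.filter (fun k => PySem.Str.startswith (PySem.Str.lower k) prefix_l)
      if any_pref.isEmpty = false then
        (PySem.List.sorted2 any_pref PySem.Str.len PySem.Str.lower).head?
      else none

-- ===== PORT B =====
-- (len(a), a.lower()) < (len(b), b.lower())
def pvLtKey (a b : String) : Bool :=
  decide (PySem.Str.len a < PySem.Str.len b) ||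
    (PySem.Str.len a == PySem.Str.len b && decide (PySem.Str.lower a < PySem.Str.lower b))

def pvUpd (best : Option String) (k : String) : Option String :=
  match best with
  | none => some k
  | some b => if pvLtKey k b then some k else some b

def best_lang_for_prefix_py_alt (keys : List String) (prefix_ : String) : Option String :=
  let prefix_l := PySem.Str.lower prefix_
  let dash := prefix_l ++ "-"
  let st := keys.foldl
    (fun (st : Option String × Option String × Option String) k =>
      let kl := PySem.Str.lower k
      ((if kl == prefix_l then some k else st.1),
       (if PySem.Str.startswith kl dash then pvUpd st.2.1 k else st.2.1),
       (if PySem.Str.startswith kl prefix_l then pvUpd st.2.2 k else st.2.2)))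
    (none, none, none)
  match st.1 with
  | some v => some v
  | none =>
    match st.2.1 with
    | some v => some v
    | none => st.2.2

-- ===== PRECONDITION & SPEC =====
def Spec_best_lang_for_prefix_py (keys : List String) (prefix_ : String) (out : Option String) : Prop := out = best_lang_for_prefix_py_alt keys prefix_
instance (keys : List String) (prefix_ : String) (out : Option String) : Decidable (Spec_best_lang_for_prefix_py keys prefix_ out) := by unfold Spec_best_lang_for_prefix_py; infer_instance

-- ===== CLAIM (what is proved, stated in full; the proofs are below) =====
def Claim_equal_best_lang_for_prefix_py : Prop := ∀ (keys : List String) (prefix_ : String), Dom_best_lang_for_prefix_py keys prefix_ → Spec_best_lang_for_prefix_py keys prefix_ (best_lang_for_prefix_py keys prefix_)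

-- ===== LEMMAS AND PROOFS =====

-- sorted2's comparison coincides with pvLtKey
theorem pv_lt_eq (a b : String) :
    (decide (PySem.Str.len a < PySem.Str.len b) ||
      (!decide (PySem.Str.len b < PySem.Str.len a) && decide (PySem.Str.lower a < PySem.Str.lower b)))
    = pvLtKey a b := by
  unfold pvLtKey PySem.Str.len
  by_cases h1 : a.length < b.length
  · simp [h1]
  · by_cases h2 : b.length < a.length
    · have h3 : ¬ a.length = b.length := by omega
      simp [h1, h2, h3]
    · have h3 : a.length = b.length := by omega
      simp [h3]

theorem pv_head_insertBy (before : String → String → Bool) (x : String) (acc : List String) :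
    (PySem.List.insertBy before x acc).head? =
      match acc.head? with
      | none => some x
      | some y => if before x y then some x else some y := by
  cases acc with
  | nil => simp [PySem.List.insertBy]
  | cons y ys => cases h : before x y <;> simp [PySem.List.insertBy, h]

-- head of the insertion-sort fold is the first-wins running minimum
theorem pv_fold_head (xs : List String) (acc : List String) :
    (xs.foldl (fun a x =>
        PySem.List.insertBy (fun a b =>
          decide (PySem.Str.len a < PySem.Str.len b) ||
            (!decide (PySem.Str.len b < PySem.Str.len a) && decide (PySem.Str.lower a < PySem.Str.lower b))) x a)
      acc).head? = xs.foldl pvUpd acc.head? := by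
  induction xs generalizing acc with
  | nil => rfl
  | cons x t ih =>
    simp only [List.foldl]
    rw [ih, pv_head_insertBy]
    congr 1
    cases acc with
    | nil => rfl
    | cons y ys => simp only [List.head?, pvUpd, pv_lt_eq]

theorem pv_sorted2_head (xs : List String) :
    (PySem.List.sorted2 xs PySem.Str.len PySem.Str.lower).head? = xs.foldl pvUpd none := by
  have := pv_fold_head xs []
  simpa [PySem.List.sorted2] using this

theorem pv_fold_upd_some (t : List String) (b : String) :
    (t.foldl pvUpd (some b)).isSome = true := by
  induction t generalizing b with
  | nil => rfl
  | cons x t ih =>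
    simp only [List.foldl, pvUpd]
    split <;> exact ih _

theorem pv_fold_upd_none_iff (xs : List String) :
    xs.foldl pvUpd none = none ↔ xs = [] := by
  cases xs with
  | nil => simp
  | cons x t =>
    constructor
    · intro h
      have := pv_fold_upd_some t x
      simp only [List.foldl, pvUpd] at h
      rw [h] at this
      simp at this
    · intro h; cases h

-- dict lookup after the comprehension = last-wins running fold
theorem pv_dict_fold (keys : List String) (d : PySem.Dict String String) (pl : String) :
    (keys.foldl (fun d k => d.insert (PySem.Str.lower k) k) d).get? pl
      = keys.foldl (fun acc k => if PySem.Str.lower k == pl then some k else acc) (d.get? pl) := by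
  induction keys generalizing d with
  | nil => rfl
  | cons k t ih =>
    simp only [List.foldl]
    rw [ih]
    congr 1
    by_cases h : PySem.Str.lower k = pl
    · subst h
      simp [PySem.Dict.get?_insert_self]
    · rw [PySem.Dict.get?_insert_of_ne _ _ (Ne.symm h)]
      simp [h]

-- the triple fold of B splits into three independent folds
theorem pv_triple_split (keys : List String) (pl dash : String)
    (a b c : Option String) :
    keys.foldl
      (fun (st : Option String × Option String × Option String) k =>
        let kl := PySem.Str.lower k
        ((if kl == pl then some k else st.1),
         (if PySem.Str.startswith kl dash then pvUpd st.2.1 k else st.2.1),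
         (if PySem.Str.startswith kl pl then pvUpd st.2.2 k else st.2.2)))
      (a, b, c)
    = (keys.foldl (fun acc k => if PySem.Str.lower k == pl then some k else acc) a,
       keys.foldl (fun acc k => if PySem.Str.startswith (PySem.Str.lower k) dash then pvUpd acc k else acc) b,
       keys.foldl (fun acc k => if PySem.Str.startswith (PySem.Str.lower k) pl then pvUpd acc k else acc) c) := by
  induction keys generalizing a b c with
  | nil => rfl
  | cons k t ih =>
    simp only [List.foldl]
    rw [ih]

theorem pv_filter_fold (p : String → Bool) (keys : List String) :
    (keys.filter p).foldl pvUpd none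
      = keys.foldl (fun acc k => if p k then pvUpd acc k else acc) none :=
  List.foldl_filter

-- ===== VERDICT (by name: the statement is the Claim_ definition above) =====
theorem best_lang_for_prefix_py_spec : Claim_equal_best_lang_for_prefix_py := by
  intro keys prefix_ _
  unfold Spec_best_lang_for_prefix_py
  unfold best_lang_for_prefix_py best_lang_for_prefix_py_alt
  simp only []
  rw [pv_triple_split]
  rw [pv_dict_fold]
  have hempty : (PySem.Dict.empty : PySem.Dict String String).get? (PySem.Str.lower prefix_) = none := by
    simp [PySem.Dict.empty, PySem.Dict.get?]
  rw [hempty]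
  cases hE : keys.foldl (fun acc k => if PySem.Str.lower k == PySem.Str.lower prefix_ then some k else acc) none with
  | some v => simp
  | none =>
    simp only []
    rw [pv_sorted2_head, pv_sorted2_head, pv_filter_fold, pv_filter_fold]
    by_cases hv : keys.filter (fun k => PySem.Str.startswith (PySem.Str.lower k) (PySem.Str.lower prefix_ ++ "-")) = []
    · have hbv : keys.foldl (fun acc k => if PySem.Str.startswith (PySem.Str.lower k) (PySem.Str.lower prefix_ ++ "-") then pvUpd acc k else acc) none = none := by
        rw [← pv_filter_fold, hv]; rfl
      rw [hv, hbv]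
      simp only [List.isEmpty_nil]
      by_cases ha : keys.filter (fun k => PySem.Str.startswith (PySem.Str.lower k) (PySem.Str.lower prefix_)) = []
      · have hba : keys.foldl (fun acc k => if PySem.Str.startswith (PySem.Str.lower k) (PySem.Str.lower prefix_) then pvUpd acc k else acc) none = none := by
          rw [← pv_filter_fold, ha]; rfl
        rw [ha, hba]
        simp
      · have ha' : (keys.filter (fun k => PySem.Str.startswith (PySem.Str.lower k) (PySem.Str.lower prefix_))).isEmpty = false := by
          cases h : (keys.filter (fun k => PySem.Str.startswith (PySem.Str.lower k) (PySem.Str.lower prefix_))).isEmpty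
          · rfl
          · exact absurd (List.isEmpty_iff.mp h) ha
        rw [ha']
        cases hB : keys.foldl (fun acc k => if PySem.Str.startswith (PySem.Str.lower k) (PySem.Str.lower prefix_) then pvUpd acc k else acc) none with
        | none =>
          rw [← pv_filter_fold, pv_fold_upd_none_iff] at hB
          exact absurd hB ha
        | some v => rfl
    · have hv' : (keys.filter (fun k => PySem.Str.startswith (PySem.Str.lower k) (PySem.Str.lower prefix_ ++ "-"))).isEmpty = false := by
        cases h : (keys.filter (fun k => PySem.Str.startswith (PySem.Str.lower k) (PySem.Str.lower prefix_ ++ "-"))).isEmpty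
        · rfl
        · exact absurd (List.isEmpty_iff.mp h) hv
      rw [hv']
      cases hB : keys.foldl (fun acc k => if PySem.Str.startswith (PySem.Str.lower k) (PySem.Str.lower prefix_ ++ "-") then pvUpd acc k else acc) none with
      | none =>
        rw [← pv_filter_fold, pv_fold_upd_none_iff] at hB
        exact absurd hB hv
      | some v => rfl
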